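-- pv_equiv track=rewrite | github.com/naturalstupid/PyJHora | src/jhora/utils.py | parivritti_cyclic
-- ===== SOURCE A (Python) =====
-- def parivritti_cyclic(dcf,dirn=1):
--     """
--         generates parivritti tuple (rasi_sign, hora_portion_of_varga, varga_sign)
--         In this method each hora portion gets zodiac order of the rasis
--         for rasi_sign = 0, first hora portion gets rasi=0, next hora portion gets rasi=1 and so on
--         For hora chart
--             (0-15 deg) of rasi sign = 0(Ar), 15-30deg of Ar  gets next rasi = 1 (Ta) = > (0,1),
--             Now for rasi sign = 2 (Gemini) 0-15 deg is Ge (2) and 15-30 deg is Cn (3) => (2,3)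
--             And so on (0,1), (2,3)..
--             Similarly for drekkana (0,1,2), (2,3,4), (5,6,7), (7,8,9), (9,10,11), (0,1,2)...
--         @param varga divisional chart factor: 2=>Hora, 3=Drekkana etc
--         @return parivritti cyclical tuple
--     """
--     pc = []
--     hs = 0
--     for _ in range(12):
--         t = tuple()
--         for _ in range(dcf):
--             t += (hs%12,); hs = (hs+dirn)%12
--         pc.append(t)
--     return pc
-- ===== SOURCE B (Python) =====
-- def parivritti_cyclic(dcf, dirn=1):
--     # Closed-form: element (i, j) is ((i*dcf + j)*dirn) % 12 -- no running counter.
--     return [tuple(((i * dcf + j) * dirn) % 12 for j in range(dcf)) for i in range(12)]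
-- ===== Notes on version B (the rewrite author's own statement) =====
-- stated objective: faster
-- what changed: The mutable running counter hs threaded through both nested loops is removed; each entry is computed directly from its coordinates by the closed form ((i*dcf + j)*dirn) % 12, and each tuple is built in one pass instead of by repeated tuple concatenation.
import Mathlib
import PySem

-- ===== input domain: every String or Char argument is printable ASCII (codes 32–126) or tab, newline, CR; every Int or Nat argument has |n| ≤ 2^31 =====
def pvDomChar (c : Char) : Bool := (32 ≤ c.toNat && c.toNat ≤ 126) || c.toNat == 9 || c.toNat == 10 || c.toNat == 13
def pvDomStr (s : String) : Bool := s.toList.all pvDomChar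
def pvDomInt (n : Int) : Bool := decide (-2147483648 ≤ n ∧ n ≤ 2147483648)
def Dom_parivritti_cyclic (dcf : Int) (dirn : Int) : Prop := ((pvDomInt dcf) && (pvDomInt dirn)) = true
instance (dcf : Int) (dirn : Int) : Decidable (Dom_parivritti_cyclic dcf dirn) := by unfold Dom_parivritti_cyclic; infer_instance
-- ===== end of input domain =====

-- B replaces A's running counter hs with a closed-form index formula; same cost, no mutable state.
-- ===== PORT A =====
def parivritti_cyclic (dcf : Int) (dirn : Int) : List (List Int) :=
  -- pc = [], hs = 0; for _ in range(12): t = (); for _ in range(dcf): t += (hs%12,); hs = (hs+dirn)%12; pc.append(t)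
  (PySem.List.pyRange 0 12 1).foldl
    (fun (st : List (List Int) × Int) _ =>
      let inner :=
        (PySem.List.pyRange 0 dcf 1).foldl
          (fun (ti : List Int × Int) _ =>
            (ti.1 ++ [PySem.Int.mod ti.2 12], PySem.Int.mod (ti.2 + dirn) 12))
          ([], st.2)
      (st.1 ++ [inner.1], inner.2))
    ([], 0) |>.1

-- ===== PORT B =====
def parivritti_cyclic_alt (dcf : Int) (dirn : Int) : List (List Int) :=
  (PySem.List.pyRange 0 12 1).map (fun i =>
    (PySem.List.pyRange 0 dcf 1).map (fun j =>
      PySem.Int.mod ((i * dcf + j) * dirn) 12))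

-- ===== PRECONDITION & SPEC =====
def Spec_parivritti_cyclic (dcf : Int) (dirn : Int) (out : List (List Int)) : Prop := out = parivritti_cyclic_alt dcf dirn
instance (dcf : Int) (dirn : Int) (out : List (List Int)) : Decidable (Spec_parivritti_cyclic dcf dirn out) := by unfold Spec_parivritti_cyclic; infer_instance

-- ===== CLAIM (what is proved, stated in full; the proofs are below) =====
def Claim_equal_parivritti_cyclic : Prop := ∀ (dcf : Int) (dirn : Int), Dom_parivritti_cyclic dcf dirn → Spec_parivritti_cyclic dcf dirn (parivritti_cyclic dcf dirn)

-- ===== LEMMAS AND PROOFS =====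

-- Inner loop of A: starting from counter value c % 12, folding over any list of length n
-- appends the values (c + j*dirn) % 12 for j < n and leaves counter (c + n*dirn) % 12.
theorem pv_inner (dirn : Int) : ∀ (l : List Int) (c : Int) (acc : List Int),
    l.foldl (fun (ti : List Int × Int) _ =>
        (ti.1 ++ [PySem.Int.mod ti.2 12], PySem.Int.mod (ti.2 + dirn) 12)) (acc, c % 12)
    = (acc ++ (List.range l.length).map (fun (j : Nat) => (c + (j : Int) * dirn) % 12),
       (c + (l.length : Int) * dirn) % 12) := by
  intro l
  induction l with
  | nil => intro c acc; simp
  | cons x xs ih =>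
    intro c acc
    have h1 : PySem.Int.mod (c % 12) 12 = c % 12 := by
      rw [PySem.Int.mod_eq_emod_of_pos (by norm_num)]; omega
    have h2 : PySem.Int.mod (c % 12 + dirn) 12 = (c + dirn) % 12 := by
      rw [PySem.Int.mod_eq_emod_of_pos (by norm_num)]; omega
    simp only [List.foldl_cons, h1, h2, ih (c + dirn) (acc ++ [c % 12])]
    simp only [Prod.mk.injEq, List.length_cons]
    constructor
    · rw [List.append_assoc]
      congr 1
      rw [List.range_succ_eq_map, List.map_cons, List.map_map]
      simp only [List.singleton_append, List.cons.injEq]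
      constructor
      · norm_num
      · apply List.map_congr_left
        intro j _
        simp only [Function.comp_apply]
        congr 1
        push_cast
        ring
    · congr 1
      push_cast
      ring

-- Outer loop of A: starting from counter c % 12 the rows are the inner results at
-- counters c + i*n*dirn, where n is the inner list's length.
theorem pv_outer (dirn : Int) (il : List Int) : ∀ (l : List Int) (c : Int) (acc : List (List Int)),
    l.foldl (fun (st : List (List Int) × Int) _ =>
        let inner := il.foldl (fun (ti : List Int × Int) _ =>
            (ti.1 ++ [PySem.Int.mod ti.2 12], PySem.Int.mod (ti.2 + dirn) 12)) ([], st.2)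
        (st.1 ++ [inner.1], inner.2)) (acc, c % 12)
    = (acc ++ (List.range l.length).map (fun (i : Nat) =>
         (List.range il.length).map (fun (j : Nat) =>
           (c + (i : Int) * (il.length : Int) * dirn + (j : Int) * dirn) % 12)),
       (c + (l.length : Int) * (il.length : Int) * dirn) % 12) := by
  intro l
  induction l with
  | nil => intro c acc; simp
  | cons x xs ih =>
    intro c acc
    simp only [List.foldl_cons, pv_inner dirn il c [], List.nil_append,
      ih (c + (il.length : Int) * dirn) (acc ++ [(List.range il.length).map
        (fun (j : Nat) => (c + (j : Int) * dirn) % 12)])]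
    simp only [Prod.mk.injEq, List.length_cons]
    constructor
    · rw [List.append_assoc]
      congr 1
      rw [List.range_succ_eq_map, List.map_cons, List.map_map]
      simp only [List.singleton_append, List.cons.injEq]
      constructor
      · apply List.map_congr_left; intro j _; congr 1; push_cast; ring
      · apply List.map_congr_left
        intro i _
        simp only [Function.comp_apply]
        apply List.map_congr_left
        intro j _
        congr 1
        push_cast
        ring
    · congr 1
      push_cast
      ring

-- ===== VERDICT (by name: the statement is the Claim_ definition above) =====
theorem parivritti_cyclic_spec : Claim_equal_parivritti_cyclic := by
  intro dcf dirn _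
  unfold Spec_parivritti_cyclic parivritti_cyclic parivritti_cyclic_alt
  have hr := pv_outer dirn (PySem.List.pyRange 0 dcf 1) (PySem.List.pyRange 0 12 1) 0 []
  rw [show (0 : Int) % 12 = 0 by norm_num] at hr
  rw [hr]
  simp only [List.nil_append, PySem.List.length_pyRange_one]
  rw [PySem.List.pyRange_one 0 12, PySem.List.pyRange_one 0 dcf]
  simp only [List.map_map]
  norm_num
  intro i hi j hj
  have hd0 : 0 ≤ dcf := le_trans (Int.natCast_nonneg j) (le_of_lt hj)
  rw [max_eq_left hd0]
  congr 1
  ring
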